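-- pv_equiv track=rewrite | github.com/VergiKorea/VergiKorea_Appunti | 1o anno/python/Eserciziario/21/program.py | es21
-- ===== SOURCE A (Python) =====
-- def es21(matrice):
--     '''
--     es21(matrice) presa la matrice di caratteri rappresentata tramite una lista di liste di caratteri,
--     la restituisce dopo averne ordinato le colonne in ordine lessicografico.
--     La matrice passata in input al termine della funzione non deve risultare modificata.
--     Ad esempio se la matrice di input e'
--      [['q','s','g','g'],
--       ['b','a','m','f'],
--       ['a','b','n','z']]
--     la funzione restituira' la matrice:
--      [['a','a','g','f'],
--       ['b','b','m','g'],
--       ['q','s','n','z']]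
--     '''
--
--     matrice2 = []
--     for c in range(len(matrice[0])):
--         row = []
--         for r in range(len(matrice)):
--             row.append(matrice[r][c])
--         matrice2.append(row)
--     for r in range(len(matrice2)):
--         matrice2[r] = sorted(matrice2[r])
--     matrice_out = []
--     for c in range(len(matrice2[0])):
--         row = []
--         for r in range(len(matrice2)):
--             row.append(matrice2[r][c])
--         matrice_out.append(row)
--     return matrice_out
-- ===== SOURCE B (Python) =====
-- def es21(matrice):
--     # one global sort: tag every cell with its column index, sort all (column, value)
--     # pairs at once, then read the output rows off the flat sorted list by index arithmetic
--     rows = len(matrice)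
--     cols = len(matrice[0])
--     flat = sorted([(c, matrice[r][c]) for r in range(rows) for c in range(cols)])
--     return [[flat[c * rows + r][1] for c in range(cols)] for r in range(rows)]
-- ===== Notes on version B (the rewrite author's own statement) =====
-- stated objective: alternative
-- what changed: Instead of transposing, sorting every row of the transpose with the library sort and transposing back, B tags every cell with its column index, performs ONE global sort of all (column, value) pairs, and reads the output rows off the flat sorted list by index arithmetic (flat[c*rows+r]).
import Mathlib
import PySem

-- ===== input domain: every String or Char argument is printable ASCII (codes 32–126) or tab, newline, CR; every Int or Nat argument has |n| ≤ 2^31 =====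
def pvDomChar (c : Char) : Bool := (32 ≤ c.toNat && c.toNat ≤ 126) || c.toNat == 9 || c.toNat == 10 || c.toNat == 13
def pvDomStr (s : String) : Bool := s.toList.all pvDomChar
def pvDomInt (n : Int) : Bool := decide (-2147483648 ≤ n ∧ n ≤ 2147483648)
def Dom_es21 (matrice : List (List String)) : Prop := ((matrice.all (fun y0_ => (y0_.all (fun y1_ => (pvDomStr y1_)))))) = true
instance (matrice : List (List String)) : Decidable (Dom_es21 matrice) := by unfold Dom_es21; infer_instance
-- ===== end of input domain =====

-- B is an alternative of similar cost: instead of transpose / per-row library sorts / transpose back,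
-- it performs ONE global sort of all (column index, value) cell pairs and reshapes the flat sorted
-- list by index arithmetic; return value only, neither version mutates its argument.

-- ===== PORT A =====
-- matrice[r][c] is ported as getD; Pre_es21 guarantees every such index is in range, so getD is exact there.
def es21 (matrice : List (List String)) : List (List String) :=
  let matrice2 := (List.range (matrice.getD 0 []).length).map (fun c =>
    (List.range matrice.length).map (fun r => (matrice.getD r []).getD c ""))
  let matrice2s := matrice2.map (fun row => PySem.List.sorted row (fun s => s) false)
  (List.range (matrice2s.getD 0 []).length).map (fun c =>
    (List.range matrice2s.length).map (fun r => (matrice2s.getD r []).getD c ""))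

-- ===== PORT B =====
-- Source B's sorted(list of (int, str) tuples) compares tuples lexicographically: ported as
-- PySem.List.sorted2 with the two component keys (exact for Python's tuple comparison).
def es21_alt (matrice : List (List String)) : List (List String) :=
  let rows := matrice.length
  let cols := (matrice.getD 0 []).length
  let flat := PySem.List.sorted2
    ((List.range rows).flatMap (fun r =>
      (List.range cols).map (fun c => (c, (matrice.getD r []).getD c ""))))
    (fun p => p.1) (fun p => p.2) false
  (List.range rows).map (fun r =>
    (List.range cols).map (fun c => (flat.getD (c * rows + r) (0, "")).2))

-- ===== PRECONDITION & SPEC =====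
-- Pre_ admits exactly the inputs where A returns: a non-empty matrix with a non-empty first row and no
-- row shorter than the first (otherwise some matrice[r][c] / matrice2[0] access raises IndexError).
def Pre_es21 (matrice : List (List String)) : Prop :=
  matrice ≠ [] ∧ 0 < (matrice.getD 0 []).length ∧
    ∀ row ∈ matrice, (matrice.getD 0 []).length ≤ row.length
instance (matrice : List (List String)) : Decidable (Pre_es21 matrice) := by
  unfold Pre_es21; infer_instance
def pvWitness_es21 : List (List String) := [["b", "x"], ["a", "y"]]

def Spec_es21 (matrice : List (List String)) (out : List (List String)) : Prop := out = es21_alt matrice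
instance (matrice : List (List String)) (out : List (List String)) : Decidable (Spec_es21 matrice out) := by unfold Spec_es21; infer_instance

-- ===== CLAIM (what is proved, stated in full; the proofs are below) =====
def Claim_equal_es21 : Prop := ∀ (matrice : List (List String)), Dom_es21 matrice → Pre_es21 matrice → Spec_es21 matrice (es21 matrice)

-- ===== LEMMAS AND PROOFS =====

-- the sorted column c of matrice, as A computes it
def pvSc (matrice : List (List String)) (c : Nat) : List String :=
  PySem.List.sorted
    ((List.range matrice.length).map (fun r => (matrice.getD r []).getD c "")) (fun s => s) false

-- the flat sorted pair list, written column-block by column-block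
def pvBlock (matrice : List (List String)) (c : Nat) : List (Nat × String) :=
  (pvSc matrice c).map (fun v => (c, v))
def pvFlat (matrice : List (List String)) : List (Nat × String) :=
  (List.range (matrice.getD 0 []).length).flatMap (pvBlock matrice)

-- the Bool comparison sorted2 uses for the key pair (fst, snd)
def pvLt (a b : Nat × String) : Bool :=
  decide (a.1 < b.1) || (!decide (b.1 < a.1) && decide (a.2 < b.2))
-- the lexicographic order it realises
def pvR (a b : Nat × String) : Prop := toLex a ≤ toLex b

theorem pv_getD_map_range {α : Type} (f : Nat → α) (n i : Nat) (d : α) (h : i < n) :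
    ((List.range n).map f).getD i d = f i := by
  rw [List.getD_eq_getElem _ _ (by simpa using h)]
  simp

theorem pvR_of_pvLt {a b : Nat × String} (h : pvLt a b = true) : pvR a b := by
  unfold pvLt at h
  unfold pvR
  rw [Prod.Lex.toLex_le_toLex]
  simp only [Bool.or_eq_true, Bool.and_eq_true, Bool.not_eq_eq_eq_not, Bool.not_true,
    decide_eq_true_eq, decide_eq_false_iff_not] at h
  rcases h with h | ⟨h1, h2⟩
  · exact Or.inl h
  · by_cases hlt : a.1 < b.1
    · exact Or.inl hlt
    · exact Or.inr ⟨le_antisymm (not_lt.mp h1) (not_lt.mp hlt), le_of_lt h2⟩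

theorem pvR_of_not_pvLt {a b : Nat × String} (h : pvLt a b = false) : pvR b a := by
  unfold pvLt at h
  unfold pvR
  rw [Prod.Lex.toLex_le_toLex]
  simp only [Bool.or_eq_false_iff, Bool.and_eq_false_iff, Bool.not_eq_eq_eq_not, Bool.not_false,
    decide_eq_true_eq, decide_eq_false_iff_not] at h
  obtain ⟨h1, h2⟩ := h
  rcases h2 with h2 | h2
  · exact Or.inl (lt_of_not_ge (by simpa using h2))
  · by_cases hlt : b.1 < a.1
    · exact Or.inl hlt
    · exact Or.inr ⟨le_antisymm (not_lt.mp h1) (not_lt.mp hlt), not_lt.mp h2⟩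

theorem pvR_trans {a b c : Nat × String} (h1 : pvR a b) (h2 : pvR b c) : pvR a c :=
  le_trans h1 h2

-- inserting into a pvR-sorted list keeps it pvR-sorted
theorem pv_insertBy_pairwise (x : Nat × String) (acc : List (Nat × String))
    (h : acc.Pairwise pvR) : (PySem.List.insertBy pvLt x acc).Pairwise pvR := by
  induction acc with
  | nil => simp [PySem.List.insertBy]
  | cons y ys ih =>
    rw [List.pairwise_cons] at h
    obtain ⟨hy, hys⟩ := h
    by_cases hb : pvLt x y = true
    · rw [show PySem.List.insertBy pvLt x (y :: ys) = x :: y :: ys by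
        simp [PySem.List.insertBy, hb]]
      rw [List.pairwise_cons]
      refine ⟨?_, by rw [List.pairwise_cons]; exact ⟨hy, hys⟩⟩
      intro z hz
      rcases List.mem_cons.mp hz with hz | hz
      · subst hz; exact pvR_of_pvLt hb
      · exact pvR_trans (pvR_of_pvLt hb) (hy z hz)
    · rw [show PySem.List.insertBy pvLt x (y :: ys) = y :: PySem.List.insertBy pvLt x ys by
        simp [PySem.List.insertBy, hb]]
      rw [List.pairwise_cons]
      refine ⟨?_, ih hys⟩
      intro z hz
      rcases (PySem.List.mem_insertBy pvLt x z ys).mp hz with hz | hz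
      · subst hz; exact pvR_of_not_pvLt (by simpa using hb)
      · exact hy z hz

theorem pv_foldl_insertBy_pairwise (xs : List (Nat × String)) (acc : List (Nat × String))
    (h : acc.Pairwise pvR) :
    (xs.foldl (fun acc x => PySem.List.insertBy pvLt x acc) acc).Pairwise pvR := by
  induction xs generalizing acc with
  | nil => exact h
  | cons a t ih => exact ih _ (pv_insertBy_pairwise a acc h)

-- B's sorted2 call, as the insertBy fold it is
theorem pv_sorted2_eq_fold (xs : List (Nat × String)) :
    PySem.List.sorted2 xs (fun p => p.1) (fun p => p.2) false
      = xs.foldl (fun acc x => PySem.List.insertBy pvLt x acc) [] := rfl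

-- pvFlat is pvR-sorted: within a block snd is sorted, across blocks fst strictly grows
theorem pv_flat_pairwise (matrice : List (List String)) (n : Nat) :
    ((List.range n).flatMap (pvBlock matrice)).Pairwise pvR := by
  induction n with
  | zero => simp
  | succ m ih =>
    rw [List.range_succ, List.flatMap_append, List.flatMap_singleton]
    rw [List.pairwise_append]
    refine ⟨ih, ?_, ?_⟩
    · unfold pvBlock
      apply List.Pairwise.map
      · intro a b hab
        unfold pvR
        rw [Prod.Lex.toLex_le_toLex]
        exact Or.inr ⟨rfl, hab⟩
      · exact PySem.List.sorted_pairwise _ _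
    · intro a ha b hb
      obtain ⟨c, hc, hac⟩ := List.mem_flatMap.mp ha
      unfold pvBlock at hac hb
      obtain ⟨v, -, rfl⟩ := List.mem_map.mp hac
      obtain ⟨u, -, rfl⟩ := List.mem_map.mp hb
      unfold pvR
      rw [Prod.Lex.toLex_le_toLex]
      exact Or.inl (List.mem_range.mp hc)

-- blockwise permutation congruence for flatMap
theorem pv_perm_flatMap {β : Type} (l : List Nat) (f g : Nat → List β)
    (h : ∀ c ∈ l, (f c).Perm (g c)) : (l.flatMap f).Perm (l.flatMap g) := by
  induction l with
  | nil => simp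
  | cons a t ih =>
    simp only [List.flatMap_cons]
    exact (h a (by simp)).append (ih (fun c hc => h c (by simp [hc])))

-- peeling the last element of every block off a flatMap
theorem pv_flatMap_snoc {β : Type} (l : List Nat) (g : Nat → List β) (h : Nat → β) :
    (l.flatMap (fun c => g c ++ [h c])).Perm (l.flatMap g ++ l.map h) := by
  induction l with
  | nil => simp
  | cons a t ih =>
    simp only [List.flatMap_cons, List.map_cons, List.append_assoc, List.singleton_append]
    apply List.Perm.append_left
    exact (ih.cons (h a)).trans List.perm_middle.symm

-- the column-major flatMap is a permutation of the row-major one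
theorem pv_flatMap_swap {β : Type} (m n : Nat) (f : Nat → Nat → β) :
    ((List.range n).flatMap (fun c => (List.range m).map (fun r => f r c))).Perm
      ((List.range m).flatMap (fun r => (List.range n).map (f r))) := by
  induction m with
  | zero => simp
  | succ k ih =>
    have hsplit : ∀ c, (List.range (k + 1)).map (fun r => f r c)
        = (List.range k).map (fun r => f r c) ++ [f k c] := by
      intro c
      rw [List.range_succ, List.map_append, List.map_singleton]
    simp only [hsplit]
    refine (pv_flatMap_snoc _ _ _).trans ?_
    rw [List.range_succ, List.flatMap_append, List.flatMap_singleton]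
    exact ih.append (List.Perm.refl _)

-- pvFlat is a permutation of B's row-major pair list
theorem pv_flat_perm (matrice : List (List String)) :
    (pvFlat matrice).Perm
      ((List.range matrice.length).flatMap (fun r =>
        (List.range (matrice.getD 0 []).length).map
          (fun c => (c, (matrice.getD r []).getD c "")))) := by
  unfold pvFlat
  refine List.Perm.trans (l₂ := (List.range (matrice.getD 0 []).length).flatMap (fun c =>
      (List.range matrice.length).map (fun r => (c, (matrice.getD r []).getD c "")))) ?_ ?_
  · apply pv_perm_flatMap
    intro c _
    unfold pvBlock pvSc
    have hperm := PySem.List.sorted_perm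
      ((List.range matrice.length).map (fun r => (matrice.getD r []).getD c ""))
      (fun s => s) false
    refine (hperm.map (fun v => (c, v))).trans (List.Perm.of_eq ?_)
    rw [List.map_map]
    rfl
  · exact pv_flatMap_swap matrice.length (matrice.getD 0 []).length
      (fun r c => (c, (matrice.getD r []).getD c ""))

-- B's global sort equals the column-block list
theorem pv_sorted2_eq_flat (matrice : List (List String)) :
    PySem.List.sorted2
      ((List.range matrice.length).flatMap (fun r =>
        (List.range (matrice.getD 0 []).length).map
          (fun c => (c, (matrice.getD r []).getD c ""))))
      (fun p => p.1) (fun p => p.2) false = pvFlat matrice := by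
  apply PySem.List.eq_of_perm_of_pairwise_le_of_injective (fun p : Nat × String => toLex p)
    (fun a b h => h)
  · exact (PySem.List.sorted2_perm _ _ _ _).trans (pv_flat_perm matrice).symm
  · rw [pv_sorted2_eq_fold]
    exact pv_foldl_insertBy_pairwise _ _ (by simp)
  · exact pv_flat_pairwise matrice _

theorem pv_block_length (matrice : List (List String)) (c : Nat) :
    (pvBlock matrice c).length = matrice.length := by
  unfold pvBlock pvSc
  rw [List.length_map, PySem.List.length_sorted]
  simp

theorem pv_flatMap_range_length {β : Type} (blocks : Nat → List β) (L n : Nat)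
    (hL : ∀ c, (blocks c).length = L) : ((List.range n).flatMap blocks).length = n * L := by
  induction n with
  | zero => simp
  | succ m ih =>
    rw [List.range_succ, List.flatMap_append, List.flatMap_singleton, List.length_append, ih, hL]
    ring

theorem pv_flatMap_range_getD {β : Type} (blocks : Nat → List β) (L n c r : Nat) (d : β)
    (hL : ∀ c, (blocks c).length = L) (hc : c < n) (hr : r < L) :
    ((List.range n).flatMap blocks).getD (c * L + r) d = (blocks c).getD r d := by
  induction n with
  | zero => omega
  | succ m ih =>
    rw [List.range_succ, List.flatMap_append, List.flatMap_singleton]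
    by_cases hcm : c < m
    · rw [List.getD_append]
      · exact ih hcm
      · rw [pv_flatMap_range_length blocks L m hL]
        calc c * L + r < c * L + L := by omega
          _ = (c + 1) * L := by ring
          _ ≤ m * L := Nat.mul_le_mul_right L hcm
    · have hcm' : c = m := by omega
      subst hcm'
      rw [List.getD_append_right]
      · rw [pv_flatMap_range_length blocks L c hL]
        congr 1
        omega
      · rw [pv_flatMap_range_length blocks L c hL]
        omega

theorem pv_es21_alt_eq (matrice : List (List String)) :
    es21_alt matrice
      = (List.range matrice.length).map (fun i =>
          (List.range (matrice.getD 0 []).length).map (fun j => (pvSc matrice j).getD i "")) := by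
  simp only [es21_alt]
  rw [pv_sorted2_eq_flat]
  apply List.map_congr_left
  intro r hr
  apply List.map_congr_left
  intro c hc
  unfold pvFlat
  rw [pv_flatMap_range_getD (pvBlock matrice) matrice.length _ c r (0, "")
    (pv_block_length matrice) (List.mem_range.mp hc) (List.mem_range.mp hr)]
  unfold pvBlock
  have hrlen : r < (pvSc matrice c).length := by
    unfold pvSc
    rw [PySem.List.length_sorted]
    simpa using List.mem_range.mp hr
  rw [List.getD_eq_getElem _ _ (by simpa using hrlen), List.getElem_map,
    List.getD_eq_getElem _ _ hrlen]

theorem pv_es21_eq (matrice : List (List String)) (h : Pre_es21 matrice) :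
    es21 matrice
      = (List.range matrice.length).map (fun i =>
          (List.range (matrice.getD 0 []).length).map (fun j => (pvSc matrice j).getD i "")) := by
  obtain ⟨hne, hc, -⟩ := h
  simp only [es21, List.map_map]
  rw [pv_getD_map_range _ _ _ _ hc]
  simp only [Function.comp_apply]
  rw [show ((PySem.List.sorted ((List.range matrice.length).map
        (fun r => (matrice.getD r []).getD 0 "")) (fun s => s) false).length)
      = matrice.length by rw [PySem.List.length_sorted]; simp]
  simp only [List.length_map, List.length_range]
  apply List.map_congr_left
  intro i hi
  apply List.map_congr_left
  intro j hj
  rw [pv_getD_map_range _ _ _ _ (by simpa using hj)]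
  rfl

-- ===== VERDICT (by name: the statement is the Claim_ definition above) =====
theorem es21_spec : Claim_equal_es21 := by
  intro matrice _ hpre
  unfold Spec_es21
  rw [pv_es21_eq matrice hpre, pv_es21_alt_eq matrice]
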